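-- pv_equiv track=rewrite | github.com/14chanwa/ProjectEuler | problem209 - Circular Logic.py | getTableRow
-- ===== SOURCE A (Python) =====
-- def getTableRow(index):
--     row = []
--     for i in range(0, 6):
--         if (index // 2**(6 - i - 1) ) % 2 == 0:
--             row.append(False)
--         else:
--             row.append(True)
--     return row
-- ===== SOURCE B (Python) =====
-- def getTableRow(index):
--     # Extract bits least-significant first from a shrinking quotient, then reverse.
--     row = []
--     for _ in range(6):
--         row.append(bool(index % 2))
--         index //= 2
--     row.reverse()
--     return row
-- ===== Notes on version B (the rewrite author's own statement) =====
-- stated objective: alternative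
-- what changed: B extracts bits least-significant first from a shrinking quotient (repeated modulo and floor-division by two, six iterations) and reverses the list at the end, instead of A computing a fixed power-of-two divisor per big-endian position.
import Mathlib
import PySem

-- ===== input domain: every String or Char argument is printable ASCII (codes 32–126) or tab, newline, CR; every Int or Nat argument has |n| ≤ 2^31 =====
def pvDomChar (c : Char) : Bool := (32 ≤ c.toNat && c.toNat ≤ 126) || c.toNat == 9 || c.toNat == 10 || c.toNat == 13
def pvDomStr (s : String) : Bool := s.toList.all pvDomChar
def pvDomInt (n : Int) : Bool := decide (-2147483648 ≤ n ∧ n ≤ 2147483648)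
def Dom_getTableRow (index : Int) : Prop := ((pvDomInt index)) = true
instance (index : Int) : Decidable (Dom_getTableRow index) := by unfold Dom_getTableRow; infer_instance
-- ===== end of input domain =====

-- B extracts bits least-significant first from a shrinking quotient and reverses at the end,
-- instead of A's per-position fixed power-of-two divisor; objective: alternative decomposition.

-- ===== PORT A =====
-- for i in range(0, 6): append False/True according to (index // 2**(6-i-1)) % 2 == 0
def getTableRow (index : Int) : List Bool :=
  (PySem.List.pyRange 0 6 1).foldl
    (fun row i =>
      if PySem.Int.mod (PySem.Int.floordiv index (2 ^ (6 - i - 1).toNat)) 2 = 0 then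
        row ++ [false]
      else
        row ++ [true])
    []

-- ===== PORT B =====
-- six iterations: append bool(index % 2), then index //= 2; finally reverse
def getTableRowAltLoop : Nat → Int → List Bool → List Bool
  | 0, _, row => row
  | n + 1, q, row => getTableRowAltLoop n (PySem.Int.floordiv q 2) (row ++ [decide (PySem.Int.mod q 2 ≠ 0)])

def getTableRow_alt (index : Int) : List Bool :=
  (getTableRowAltLoop 6 index []).reverse

-- ===== PRECONDITION & SPEC =====
def Spec_getTableRow (index : Int) (out : List Bool) : Prop := out = getTableRow_alt index
instance (index : Int) (out : List Bool) : Decidable (Spec_getTableRow index out) := by unfold Spec_getTableRow; infer_instance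

-- ===== CLAIM (what is proved, stated in full; the proofs are below) =====
def Claim_equal_getTableRow : Prop := ∀ (index : Int), Dom_getTableRow index → Spec_getTableRow index (getTableRow index)

-- ===== LEMMAS AND PROOFS =====

-- A's branch on (… % 2 == 0) appends exactly the negated evenness bit.
theorem pv_ite_append (row : List Bool) (c : Prop) [Decidable c] :
    (if c then row ++ [false] else row ++ [true]) = row ++ [!decide c] := by
  by_cases h : c
  · simp [h]
  · simp [h]

-- the negated evenness test is the low bit
theorem pv_bit (x : Int) : (!decide (2 ∣ x)) = decide (x % 2 = 1) := by
  by_cases h : (2:Int) ∣ x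
  · simp only [h, decide_true, Bool.not_true]
    symm; simp only [decide_eq_false_iff_not]; omega
  · simp only [h, decide_false, Bool.not_false]
    symm; simp only [decide_eq_true_eq]; omega

-- ===== VERDICT (by name: the statement is the Claim_ definition above) =====
theorem getTableRow_spec : Claim_equal_getTableRow := by
  intro index _
  unfold Spec_getTableRow getTableRow getTableRow_alt
  simp only [getTableRowAltLoop, PySem.List.pyRange]
  simp only [PySem.Int.floordiv_eq_ediv_of_pos (a := index) (by omega : (0:Int) < 2)]
  norm_num [List.foldl, PySem.Int.mod, PySem.Int.floordiv, Int.fmod_eq_emod, Int.fdiv_eq_ediv,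
    pv_ite_append]
  simp only [pv_bit]
  simp only [show ((6:Int)).toNat = 6 from rfl, List.range_succ, List.map_append, List.map_cons,
    List.map_nil, List.flatten_append, List.flatten_cons, List.flatten_nil, Function.comp,
    List.append_nil]
  norm_num
  simp only [show (2:Int) ^ ((6:Int).toNat - 1) = 32 from by decide,
    show (2:Int) ^ ((5:Int).toNat - 1) = 16 from by decide,
    show (2:Int) ^ ((4:Int).toNat - 1) = 8 from by decide,
    show (2:Int) ^ ((3:Int).toNat - 1) = 4 from by decide,
    show (2:Int) ^ ((2:Int).toNat - 1) = 2 from by decide]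
  exact ⟨by omega, by omega, by omega, by omega, trivial⟩
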